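-- pv_equiv track=rewrite | github.com/Thesoigneusse/Attention_git | Utils/Utils_concat.py | ajoute_eos_tokens_src
-- ===== SOURCE A (Python) =====
-- from copy import deepcopy
--
-- def ajoute_eos_tokens_src(_snt: list, src_segments_labels: list, eos_token: str = "<eos>") -> list:
--     """Ajoute un token end-of-sentence dans la phrase afin de faire concorder la taille de la matrice et de la phrase
--
--     Args:
--         _snt (list): list de token de la phrase côté source
--         src_segments_labels (list): list d'id de contexte pour chaque token de la phrase _snt
--         eos_token (str, optional): token end-of-sentence. Defaults to "<eos>".
--
--     Returns:
--         list: list de tokens de la phrase coté source avec les tokens end-of-sentence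
--     """
--     assert len(_snt) <= len(src_segments_labels), f"[DEBUG]Longueur error, len(snt) vs. len(labels): {len(_snt)} vs. {len(src_segments_labels)}"
--     snt = deepcopy(_snt)
--     # Si on a des éléments à ajouter
--     if len(snt) < len(src_segments_labels):
--         # Parcours de src_segments_label
--         for i in range(len(src_segments_labels) - 1):
--             # Si on trouve un changement de segments alors on ajoute un token <eos>
--             if src_segments_labels[i] != src_segments_labels[i+1]:
--                 snt.insert(i, eos_token)
--     assert len(snt) == len(src_segments_labels)
--     return snt
-- ===== SOURCE B (Python) =====
-- def ajoute_eos_tokens_src(_snt: list, src_segments_labels: list, eos_token: str = "<eos>") -> list: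
--     """Single left-to-right pass: the final sentence has the eos token exactly at the
--     label-boundary positions and the original tokens, in order, everywhere else."""
--     n = len(src_segments_labels)
--     assert len(_snt) <= n, f"[DEBUG]Longueur error, len(snt) vs. len(labels): {len(_snt)} vs. {n}"
--     if len(_snt) == n:
--         return list(_snt)
--     out = []
--     j = 0
--     for cur, nxt in zip(src_segments_labels, src_segments_labels[1:]):
--         if cur != nxt:
--             out.append(eos_token)
--         else:
--             out.append(_snt[j])
--             j += 1
--     out.append(_snt[j])
--     assert j + 1 == len(_snt)
--     return out
-- ===== Notes on version B (the rewrite author's own statement) =====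
-- stated objective: faster
-- what changed: Replaces A's repeated list.insert at shifted positions (each insert is O(n)) by a single left-to-right pass over the label pairs that emits the eos token at each boundary and the next original token otherwise.
import Mathlib
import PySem

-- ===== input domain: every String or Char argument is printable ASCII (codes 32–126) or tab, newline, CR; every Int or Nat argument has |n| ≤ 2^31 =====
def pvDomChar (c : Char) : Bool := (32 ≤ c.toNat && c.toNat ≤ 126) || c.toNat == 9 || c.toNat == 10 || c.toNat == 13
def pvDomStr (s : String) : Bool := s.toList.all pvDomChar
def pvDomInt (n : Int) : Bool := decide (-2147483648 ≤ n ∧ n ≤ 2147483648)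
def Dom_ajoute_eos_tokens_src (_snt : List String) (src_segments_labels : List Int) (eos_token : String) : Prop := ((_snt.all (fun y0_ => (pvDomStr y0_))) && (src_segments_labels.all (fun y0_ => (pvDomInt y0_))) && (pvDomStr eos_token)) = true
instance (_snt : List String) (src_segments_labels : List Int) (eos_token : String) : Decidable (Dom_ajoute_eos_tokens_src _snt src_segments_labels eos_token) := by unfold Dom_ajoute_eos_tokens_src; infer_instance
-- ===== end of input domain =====

-- B replaces A's quadratic loop of list.insert calls by one linear left-to-right pass
-- that emits eos at each label boundary and the next original token otherwise.

-- ===== PORT A =====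
-- Literal port of A: copy _snt, and if it is shorter than the label list, for each
-- i in range(len(labels)-1) insert eos_token at position i whenever labels[i] != labels[i+1].
-- (A's two asserts raise outside Pre_ below; deepcopy of a list of strings = the list itself.)
def ajoute_eos_tokens_src (_snt : List String) (src_segments_labels : List Int) (eos_token : String) : List String :=
  if _snt.length < src_segments_labels.length then
    (PySem.List.pyRange 0 ((src_segments_labels.length : Int) - 1) 1).foldl
      (fun snt i =>
        if PySem.List.pyGetD src_segments_labels i 0 ≠ PySem.List.pyGetD src_segments_labels (i + 1) 0
        then PySem.List.insert snt i eos_token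
        else snt)
      _snt
  else _snt

-- ===== PORT B =====
-- Literal port of B: if lengths are equal return the copy; otherwise one pass over
-- zip(labels, labels[1:]) appending eos_token at boundaries and _snt[j] otherwise,
-- then the final _snt[j].  (labels[1:] is PySem.List.slice labels 1 none = drop 1.)
def ajoute_eos_tokens_src_alt (_snt : List String) (src_segments_labels : List Int) (eos_token : String) : List String :=
  if _snt.length = src_segments_labels.length then _snt
  else
    ((src_segments_labels.zip (PySem.List.slice src_segments_labels (some 1) none)).foldl
        (fun (acc : List String × Nat) (p : Int × Int) =>
          if p.1 ≠ p.2 then (acc.1 ++ [eos_token], acc.2)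
          else (acc.1 ++ [PySem.List.pyGetD _snt (acc.2 : Int) ""], acc.2 + 1))
        ([], 0)).1
      ++ [PySem.List.pyGetD _snt
            (((src_segments_labels.zip (PySem.List.slice src_segments_labels (some 1) none)).foldl
                (fun (acc : List String × Nat) (p : Int × Int) =>
                  if p.1 ≠ p.2 then (acc.1 ++ [eos_token], acc.2)
                  else (acc.1 ++ [PySem.List.pyGetD _snt (acc.2 : Int) ""], acc.2 + 1))
                ([], 0)).2 : Int) ""]

-- ===== PRECONDITION & SPEC =====
-- Pre_ excludes exactly the inputs on which A raises an AssertionError: A's first assert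
-- needs len(_snt) ≤ len(labels), and its final assert needs the number of inserted eos
-- tokens (the label boundaries) to make the lengths match when _snt is strictly shorter.
def Pre_ajoute_eos_tokens_src (_snt : List String) (src_segments_labels : List Int) (eos_token : String) : Prop :=
  _snt.length ≤ src_segments_labels.length ∧
  (_snt.length = src_segments_labels.length ∨
    _snt.length + (src_segments_labels.zip src_segments_labels.tail).countP (fun p => decide (p.1 ≠ p.2))
      = src_segments_labels.length)
instance (_snt : List String) (src_segments_labels : List Int) (eos_token : String) : Decidable (Pre_ajoute_eos_tokens_src _snt src_segments_labels eos_token) := by unfold Pre_ajoute_eos_tokens_src; infer_instance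

def pvWitness_ajoute_eos_tokens_src : List String × List Int × String := (["a", "b"], [0, 0, 1], "<eos>")

def Spec_ajoute_eos_tokens_src (_snt : List String) (src_segments_labels : List Int) (eos_token : String) (out : List String) : Prop := out = ajoute_eos_tokens_src_alt _snt src_segments_labels eos_token
instance (_snt : List String) (src_segments_labels : List Int) (eos_token : String) (out : List String) : Decidable (Spec_ajoute_eos_tokens_src _snt src_segments_labels eos_token out) := by unfold Spec_ajoute_eos_tokens_src; infer_instance

-- ===== CLAIM (what is proved, stated in full; the proofs are below) =====
def Claim_equal_ajoute_eos_tokens_src : Prop := ∀ (_snt : List String) (src_segments_labels : List Int) (eos_token : String), Dom_ajoute_eos_tokens_src _snt src_segments_labels eos_token → Pre_ajoute_eos_tokens_src _snt src_segments_labels eos_token → Spec_ajoute_eos_tokens_src _snt src_segments_labels eos_token (ajoute_eos_tokens_src _snt src_segments_labels eos_token)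

-- ===== LEMMAS AND PROOFS =====

-- The common value both loops compute: walk the boundary pairs, emitting eos at a
-- boundary and consuming one token of S otherwise; the leftover of S is appended.
def pvEmit (eos : String) : List (Int × Int) → List String → List String
  | [], S => S
  | (a, b) :: ps, S =>
      if a ≠ b then eos :: pvEmit eos ps S
      else match S with
        | [] => []
        | s :: S' => s :: pvEmit eos ps S'

-- What B's loop emits, reading tokens of snt from index j on.
def pvEmitB (snt : List String) (eos : String) : List (Int × Int) → Nat → List String
  | [], _ => []
  | (a, b) :: ps, j =>
      if a ≠ b then eos :: pvEmitB snt eos ps j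
      else PySem.List.pyGetD snt (j : Int) "" :: pvEmitB snt eos ps (j + 1)

-- number of non-boundary pairs (tokens consumed)
def pvCons (ps : List (Int × Int)) : Nat := ps.countP (fun p => decide (p.1 = p.2))
-- number of boundary pairs (eos emitted)
def pvBnd (ps : List (Int × Int)) : Nat := ps.countP (fun p => decide (p.1 ≠ p.2))

theorem pvCons_add_pvBnd (ps : List (Int × Int)) : pvCons ps + pvBnd ps = ps.length := by
  unfold pvCons pvBnd
  rw [List.length_eq_countP_add_countP (fun p => decide (p.1 = p.2))]
  simp

-- B's loop in closed form.
theorem foldB_eq (snt : List String) (eos : String) (ps : List (Int × Int)) (out : List String) (j : Nat) :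
    ps.foldl
      (fun (acc : List String × Nat) (p : Int × Int) =>
        if p.1 ≠ p.2 then (acc.1 ++ [eos], acc.2)
        else (acc.1 ++ [PySem.List.pyGetD snt (acc.2 : Int) ""], acc.2 + 1))
      (out, j)
    = (out ++ pvEmitB snt eos ps j, j + pvCons ps) := by
  induction ps generalizing out j with
  | nil => simp [pvEmitB, pvCons]
  | cons p t ih =>
      obtain ⟨a, b⟩ := p
      rw [List.foldl_cons]
      show List.foldl _
          (if a ≠ b then (out ++ [eos], j)
           else (out ++ [PySem.List.pyGetD snt (j : Int) ""], j + 1)) t = _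
      by_cases h : a = b
      · rw [if_neg (fun hc => hc h), ih]
        have hc2 : pvCons ((a, b) :: t) = 1 + pvCons t := by
          simp [pvCons, List.countP_cons, h, Nat.add_comm]
        have he : pvEmitB snt eos ((a, b) :: t) j
            = PySem.List.pyGetD snt (j : Int) "" :: pvEmitB snt eos t (j + 1) := by
          simp [pvEmitB, h]
        rw [hc2, he]
        simp only [Prod.mk.injEq]
        exact ⟨by simp, by omega⟩
      · rw [if_pos h, ih]
        have hc2 : pvCons ((a, b) :: t) = pvCons t := by
          simp [pvCons, List.countP_cons, h]
        have he : pvEmitB snt eos ((a, b) :: t) j = eos :: pvEmitB snt eos t j := by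
          simp [pvEmitB, h]
        rw [hc2, he]
        simp

-- pvEmitB plus the leftover tokens is pvEmit on the corresponding suffix of snt.
theorem emitB_eq_emit (snt : List String) (eos : String) (ps : List (Int × Int)) (j : Nat)
    (h : j + pvCons ps ≤ snt.length) :
    pvEmitB snt eos ps j ++ snt.drop (j + pvCons ps) = pvEmit eos ps (snt.drop j) := by
  induction ps generalizing j with
  | nil => simp [pvEmitB, pvEmit, pvCons]
  | cons p t ih =>
      obtain ⟨a, b⟩ := p
      by_cases hb : a = b
      · have hc : pvCons ((a, b) :: t) = pvCons t + 1 := by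
          simp [pvCons, List.countP_cons, hb]
        rw [hc] at h ⊢
        have hj : j < snt.length := by omega
        have hdrop : snt.drop j = snt[j] :: snt.drop (j + 1) := List.drop_eq_getElem_cons hj
        have hget : PySem.List.pyGetD snt (j : Int) "" = snt[j] := by
          rw [PySem.List.pyGetD_natCast]; exact List.getD_eq_getElem snt "" hj
        simp only [pvEmitB, pvEmit, hb, ne_eq, not_true_eq_false, if_false, hdrop, hget]
        have := ih (j + 1) (by omega)
        simpa [Nat.add_right_comm j 1 (pvCons t), Nat.add_assoc] using this
      · have hc : pvCons ((a, b) :: t) = pvCons t := by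
          simp [pvCons, List.countP_cons, hb]
        rw [hc] at h ⊢
        simp only [pvEmitB, pvEmit, hb, ne_eq, not_false_eq_true, if_true, List.cons_append]
        rw [ih j h]

-- A's insert loop in closed form: starting from a finished prefix P of length t and the
-- remaining tokens S (sized to absorb the boundaries of the remaining pairs), the loop over
-- indices t, t+1, …, t+c-1 produces P followed by pvEmit of the remaining pairs.
theorem foldA_eq (L : List Int) (eos : String) :
    ∀ (c t : Nat) (P S : List String),
      P.length = t →
      t + c = (L.zip L.tail).length →
      S.length + pvBnd ((L.zip L.tail).drop t) = c + 1 →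
      (List.range' t c).foldl
        (fun snt (k : Nat) =>
          if PySem.List.pyGetD L (k : Int) 0 ≠ PySem.List.pyGetD L ((k : Int) + 1) 0
          then PySem.List.insert snt (k : Int) eos
          else snt)
        (P ++ S)
      = P ++ pvEmit eos ((L.zip L.tail).drop t) S := by
  intro c
  induction c with
  | zero =>
      intro t P S hP ht hS
      have : (L.zip L.tail).drop t = [] := by
        apply List.drop_eq_nil_of_le; omega
      simp [this, pvEmit]
  | succ c ih =>
      intro t P S hP ht hS
      have htlt : t < (L.zip L.tail).length := by omega
      have hzl : (L.zip L.tail).length = min L.length L.tail.length := List.length_zip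
      have htL : t < L.length := by
        have : L.tail.length = L.length - 1 := List.length_tail
        omega
      have htL1 : t + 1 < L.length := by
        have h1 : t < L.tail.length := by omega
        have : L.tail.length = L.length - 1 := List.length_tail
        omega
      have hpair : (L.zip L.tail)[t] = (L[t], L[t+1]) := by
        rw [List.getElem_zip]
        simp [List.getElem_tail]
      have hdropPairs : (L.zip L.tail).drop t = (L[t], L[t+1]) :: (L.zip L.tail).drop (t + 1) := by
        rw [List.drop_eq_getElem_cons htlt, hpair]
      have hget1 : PySem.List.pyGetD L (t : Int) 0 = L[t] := by
        rw [PySem.List.pyGetD_natCast]; exact List.getD_eq_getElem L 0 htL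
      have hget2 : PySem.List.pyGetD L ((t : Int) + 1) 0 = L[t+1] := by
        have : ((t : Int) + 1) = ((t + 1 : Nat) : Int) := by push_cast; ring
        rw [this, PySem.List.pyGetD_natCast]; exact List.getD_eq_getElem L 0 htL1
      rw [List.range'_succ, List.foldl_cons]
      by_cases hb : L[t] = L[t+1]
      · -- not a boundary: the step does nothing, S loses its head into the prefix
        have hbnd : pvBnd ((L.zip L.tail).drop t) = pvBnd ((L.zip L.tail).drop (t + 1)) := by
          rw [hdropPairs]; simp [pvBnd, hb]
        have hSlen : 1 ≤ S.length := by
          have hble : pvBnd ((L.zip L.tail).drop (t+1)) ≤ ((L.zip L.tail).drop (t+1)).length :=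
            List.countP_le_length
          have : ((L.zip L.tail).drop (t+1)).length = (L.zip L.tail).length - (t+1) :=
            List.length_drop
          omega
        obtain ⟨s, S', rfl⟩ : ∃ s S', S = s :: S' := by
          cases S with
          | nil => simp at hSlen
          | cons s S' => exact ⟨s, S', rfl⟩
        rw [if_neg (by rw [hget1, hget2]; simpa using hb)]
        have hre : P ++ s :: S' = (P ++ [s]) ++ S' := by simp
        rw [hre, ih (t + 1) (P ++ [s]) S' (by simp [hP]) (by omega)
              (by rw [← hbnd]; simp only [List.length_cons] at hS; omega)]
        rw [hdropPairs]
        simp [pvEmit, hb]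
      · -- boundary: insert eos at position t = |P|
        rw [if_pos (by rw [hget1, hget2]; simpa using hb)]
        have hins : PySem.List.insert (P ++ S) (t : Int) eos = P ++ eos :: S := by
          have hle : t ≤ (P ++ S).length := by simp only [List.length_append, hP]; omega
          rw [PySem.List.insert_natCast (P ++ S) t eos hle]
          rw [← hP, List.take_left, List.drop_left]
        rw [hins]
        have hbnd : pvBnd ((L.zip L.tail).drop t) = pvBnd ((L.zip L.tail).drop (t + 1)) + 1 := by
          rw [hdropPairs]; simp [pvBnd, hb]
        have hre : P ++ eos :: S = (P ++ [eos]) ++ S := by simp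
        rw [hre, ih (t + 1) (P ++ [eos]) S (by simp [hP]) (by omega) (by omega)]
        rw [hdropPairs]
        simp [pvEmit, hb]

-- the leftover of a list of length j+1 after dropping j elements is its last element
theorem drop_len_pred (xs : List String) (j : Nat) (h : xs.length = j + 1) :
    xs.drop j = [PySem.List.pyGetD xs (j : Int) ""] := by
  have hj : j < xs.length := by omega
  rw [List.drop_eq_getElem_cons hj, PySem.List.pyGetD_natCast,
      List.getD_eq_getElem xs "" hj]
  have : xs.drop (j + 1) = [] := List.drop_eq_nil_of_le (by omega)
  rw [this]

-- ===== VERDICT (by name: the statement is the Claim_ definition above) =====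
theorem ajoute_eos_tokens_src_spec : Claim_equal_ajoute_eos_tokens_src := by
  intro snt L eos _hdom hpre
  obtain ⟨hle, hcase⟩ := hpre
  unfold Spec_ajoute_eos_tokens_src ajoute_eos_tokens_src ajoute_eos_tokens_src_alt
  by_cases heq : snt.length = L.length
  · rw [if_neg (by omega), if_pos heq]
  · have hlt : snt.length < L.length := by omega
    have hk : snt.length + (L.zip L.tail).countP (fun p => decide (p.1 ≠ p.2)) = L.length := by
      rcases hcase with h | h
      · exact absurd h heq
      · exact h
    rw [if_pos hlt, if_neg heq]
    -- rewrite A's pyRange fold into a List.range' fold over Nat indices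
    have hLpos : 1 ≤ L.length := by omega
    have hm : ((L.length : Int) - 1 - 0).toNat = L.length - 1 := by omega
    rw [PySem.List.pyRange_one, hm, List.foldl_map, List.range_eq_range']
    have hzlen : (L.zip L.tail).length = L.length - 1 := by
      rw [List.length_zip, List.length_tail]; omega
    have hbnd0 : pvBnd (L.zip L.tail) = (L.zip L.tail).countP (fun p => decide (p.1 ≠ p.2)) := rfl
    have hA :
        (List.range' 0 (L.length - 1)).foldl
          (fun snt' (k : Nat) =>
            if PySem.List.pyGetD L ((0 : Int) + (k : Int)) 0 ≠ PySem.List.pyGetD L ((0 : Int) + (k : Int) + 1) 0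
            then PySem.List.insert snt' ((0 : Int) + (k : Int)) eos
            else snt')
          snt
        = pvEmit eos (L.zip L.tail) snt := by
      have := foldA_eq L eos (L.length - 1) 0 [] snt rfl (by omega)
        (by rw [List.drop_zero, hbnd0]; omega)
      simpa using this
    rw [hA]
    -- B's side
    have hsl : PySem.List.slice L (some 1) none = L.tail := by
      have := PySem.List.slice_from_natCast L 1
      simpa [List.drop_one] using this
    rw [hsl, foldB_eq]
    have hcons : pvCons (L.zip L.tail) = L.length - 1 - pvBnd (L.zip L.tail) := by
      have := pvCons_add_pvBnd (L.zip L.tail)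
      omega
    have hsntlen : snt.length = pvCons (L.zip L.tail) + 1 := by
      rw [hcons, hbnd0]
      have hble : (L.zip L.tail).countP (fun p => decide (p.1 ≠ p.2)) ≤ (L.zip L.tail).length :=
        List.countP_le_length
      omega
    have := emitB_eq_emit snt eos (L.zip L.tail) 0 (by omega)
    rw [List.drop_zero] at this
    rw [← this, Nat.zero_add, drop_len_pred snt (pvCons (L.zip L.tail)) hsntlen]
    simp
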